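-- pv_equiv track=rewrite | github.com/Meka2002/Kacso.Meinda.Bevprog | otodik_hazi_masodik.py | forditas
-- ===== SOURCE A (Python) =====
-- def forditas(beker):
--     szo = beker
--     modosit =""
--     betuk="szzsnytygyly"
--     feltetel=True
--     for z in range(0,len(szo)):
--         if z != (len(szo)-1) and szo[z]+szo[z+1] in betuk and feltetel==True:
--             modosit+=szo[z+1]+szo[z]
--             feltetel=False
--
--         elif feltetel==True:
--             modosit+=szo[z]
--
--         else:
--             feltetel = True
--     return modosit
-- ===== SOURCE B (Python) =====
-- def forditas(beker):
--     betuk = "szzsnytygyly"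
--     n = len(beker)
--     # stage 1: leftmost non-overlapping positions of swappable digraphs
--     swaps = []
--     for i in range(n - 1):
--         if beker[i] + beker[i + 1] in betuk and (not swaps or i > swaps[-1] + 1):
--             swaps.append(i)
--     # stage 2: stitch the untouched slices and the reversed pairs back together
--     parts = []
--     prev = 0
--     for i in swaps:
--         parts.append(beker[prev:i])
--         parts.append(beker[i + 1] + beker[i])
--         prev = i + 2
--     parts.append(beker[prev:])
--     return "".join(parts)
-- ===== Notes on version B (the rewrite author's own statement) =====
-- stated objective: alternative
-- what changed: Replaces A's single flagged character-by-character scan with two staged passes: first collect the leftmost non-overlapping swappable digraph positions into a list, then reconstruct the result by stitching untouched bulk slices and reversed pairs with one join.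
import Mathlib
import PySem

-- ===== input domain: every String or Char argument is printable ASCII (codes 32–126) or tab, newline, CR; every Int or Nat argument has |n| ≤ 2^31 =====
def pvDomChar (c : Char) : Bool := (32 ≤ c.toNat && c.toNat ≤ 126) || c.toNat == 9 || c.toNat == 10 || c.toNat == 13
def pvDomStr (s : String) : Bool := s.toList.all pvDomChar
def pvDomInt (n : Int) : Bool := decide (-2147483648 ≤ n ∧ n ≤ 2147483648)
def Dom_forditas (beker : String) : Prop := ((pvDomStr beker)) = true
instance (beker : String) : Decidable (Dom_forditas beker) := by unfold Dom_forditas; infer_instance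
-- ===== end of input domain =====

-- B reworks A's single flagged scan into two stages — collect the leftmost
-- non-overlapping digraph positions, then stitch untouched slices and reversed
-- pairs back together; return values only (no mutation).

-- ===== PORT A =====
-- one step of A's for-loop body; state = (modosit, feltetel)
def forditasStep (szo betuk : List Char) (st : List Char × Bool) (z : Int) : List Char × Bool :=
  if z ≠ (szo.length : Int) - 1 ∧
      PySem.Chars.isIn [PySem.List.pyGetD szo z ' ', PySem.List.pyGetD szo (z + 1) ' '] betuk = true ∧
      st.2 = true then
    (st.1 ++ [PySem.List.pyGetD szo (z + 1) ' ', PySem.List.pyGetD szo z ' '], false)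
  else if st.2 = true then
    (st.1 ++ [PySem.List.pyGetD szo z ' '], st.2)
  else
    (st.1, true)

def forditas (beker : String) : String :=
  let szo := beker.toList
  let betuk := "szzsnytygyly".toList
  let st := (PySem.List.pyRange 0 (szo.length : Int) 1).foldl (forditasStep szo betuk) ([], true)
  String.ofList st.1

-- ===== PORT B =====
-- beker[i] + beker[i+1] in betuk
def forditasPair (szo betuk : List Char) (i : Int) : Bool :=
  PySem.Chars.isIn [PySem.List.pyGetD szo i ' ', PySem.List.pyGetD szo (i + 1) ' '] betuk

-- not swaps or i > swaps[-1] + 1   (swaps[-1] only read when swaps is nonempty)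
def forditasOk (sw : List Int) (i : Int) : Bool :=
  sw.isEmpty || decide (sw.getLastD 0 + 1 < i)

-- stage-1 loop body
def forditasSwapStep (szo betuk : List Char) (sw : List Int) (i : Int) : List Int :=
  if forditasPair szo betuk i && forditasOk sw i then sw ++ [i] else sw

-- stage-2 loop body; state = (flattened parts, prev)
def forditasJoinStep (szo : List Char) (st : List Char × Int) (i : Int) : List Char × Int :=
  (st.1 ++ PySem.List.slice szo (some st.2) (some i) ++
     [PySem.List.pyGetD szo (i + 1) ' ', PySem.List.pyGetD szo i ' '], i + 2)

def forditas_alt (beker : String) : String :=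
  let szo := beker.toList
  let betuk := "szzsnytygyly".toList
  let n : Int := (szo.length : Int)
  let swaps := (PySem.List.pyRange 0 (n - 1) 1).foldl (forditasSwapStep szo betuk) []
  let st := swaps.foldl (forditasJoinStep szo) ([], 0)
  String.ofList (st.1 ++ PySem.List.slice szo (some st.2) none)

-- ===== PRECONDITION & SPEC =====
def Spec_forditas (beker : String) (out : String) : Prop := out = forditas_alt beker
instance (beker : String) (out : String) : Decidable (Spec_forditas beker out) := by unfold Spec_forditas; infer_instance

-- ===== CLAIM (what is proved, stated in full; the proofs are below) =====
def Claim_equal_forditas : Prop := ∀ (beker : String), Dom_forditas beker → Spec_forditas beker (forditas beker)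

-- ===== LEMMAS AND PROOFS =====

-- common reference point of both proofs: the greedy swap recursion
def forditasGo (szo betuk : List Char) (i : Nat) : List Char :=
  if i < szo.length then
    if (i : Int) ≠ (szo.length : Int) - 1 ∧ forditasPair szo betuk (i : Int) = true then
      PySem.List.pyGetD szo ((i : Int) + 1) ' ' :: PySem.List.pyGetD szo (i : Int) ' ' ::
        forditasGo szo betuk (i + 2)
    else
      PySem.List.pyGetD szo (i : Int) ' ' :: forditasGo szo betuk (i + 1)
  else []
termination_by szo.length - i

-- A's fold from index i with the flag True equals acc ++ the greedy recursion from i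
lemma fold_eq_go (szo betuk : List Char) :
    ∀ i : Nat, ∀ acc : List Char,
      (PySem.List.pyRange (i : Int) (szo.length : Int) 1).foldl (forditasStep szo betuk) (acc, true)
        = (acc ++ forditasGo szo betuk i, true) := by
  suffices h : ∀ n i acc, szo.length - i ≤ n →
      (PySem.List.pyRange (i : Int) (szo.length : Int) 1).foldl (forditasStep szo betuk) (acc, true)
        = (acc ++ forditasGo szo betuk i, true) by
    exact fun i acc => h (szo.length - i) i acc le_rfl
  intro n
  induction n with
  | zero =>
    intro i acc hle
    have hge : ¬ i < szo.length := by omega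
    rw [PySem.List.pyRange_one_eq_nil (by exact_mod_cast Nat.le_of_not_lt hge)]
    rw [forditasGo, if_neg hge]
    simp
  | succ n ihn =>
    intro i acc hle
    by_cases hlt : i < szo.length
    · rw [PySem.List.pyRange_one_cons (by exact_mod_cast hlt)]
      rw [forditasGo]
      simp only [List.foldl_cons, if_pos hlt]
      by_cases hc : (i : Int) ≠ (szo.length : Int) - 1 ∧ forditasPair szo betuk (i : Int) = true
      · -- swap branch: the next iteration runs with the flag False and only resets it
        have hstep : forditasStep szo betuk (acc, true) (i : Int)
            = (acc ++ [PySem.List.pyGetD szo ((i : Int) + 1) ' ', PySem.List.pyGetD szo (i : Int) ' '], false) := by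
          unfold forditasStep
          rw [if_pos ⟨hc.1, hc.2, rfl⟩]
        rw [hstep, if_pos hc]
        have hi1 : i + 1 < szo.length := by
          have := hc.1; omega
        rw [PySem.List.pyRange_one_cons (by exact_mod_cast hi1)]
        have hreset : forditasStep szo betuk
            (acc ++ [PySem.List.pyGetD szo ((i : Int) + 1) ' ', PySem.List.pyGetD szo (i : Int) ' '], false) ((i : Int) + 1)
            = (acc ++ [PySem.List.pyGetD szo ((i : Int) + 1) ' ', PySem.List.pyGetD szo (i : Int) ' '], true) := by
          unfold forditasStep
          rw [if_neg (by simp), if_neg (by simp)]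
        rw [List.foldl_cons, hreset]
        have h2 : ((i : Int) + 1 + 1) = ((i + 2 : Nat) : Int) := by push_cast; ring
        rw [h2, ihn (i + 2) _ (by omega)]
        simp
      · -- plain copy branch
        have hstep : forditasStep szo betuk (acc, true) (i : Int)
            = (acc ++ [PySem.List.pyGetD szo (i : Int) ' '], true) := by
          unfold forditasStep
          rw [if_neg, if_pos rfl]
          exact fun h => hc ⟨h.1, h.2.1⟩
        rw [hstep, if_neg hc]
        have h1 : ((i : Int) + 1) = ((i + 1 : Nat) : Int) := by push_cast; ring
        rw [h1, ihn (i + 1) _ (by omega)]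
        simp
    · rw [PySem.List.pyRange_one_eq_nil (by exact_mod_cast Nat.le_of_not_lt hlt)]
      rw [forditasGo, if_neg hlt]
      simp

-- ---- B-side helpers (proof only) ----
def forditasSwaps (szo betuk : List Char) (a : Int) : List Int :=
  (PySem.List.pyRange a ((szo.length : Int) - 1) 1).foldl (forditasSwapStep szo betuk) []

def forditasStitch (szo : List Char) (l : List Int) (prev : Int) : List Char :=
  (l.foldl (forditasJoinStep szo) ([], prev)).1 ++
    PySem.List.slice szo (some ((l.foldl (forditasJoinStep szo) ([], prev)).2)) none

lemma getLastD_append_ne (sw t : List Int) (h : t ≠ []) :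
    (sw ++ t).getLastD 0 = t.getLastD 0 := by
  cases t with
  | nil => exact absurd rfl h
  | cons x xs =>
    simp [List.getLastD_eq_getLast?, List.getLast?_append]
    cases hx : (x :: xs).getLast? with
    | none => simp [List.getLast?_eq_none_iff] at hx
    | some y => simp

-- the stage-1 fold ignores an already-closed prefix of the swap list
lemma swapFold_shift (szo betuk : List Char) :
    ∀ (r : List Int) (sw t : List Int), t ≠ [] →
      r.foldl (forditasSwapStep szo betuk) (sw ++ t) = sw ++ r.foldl (forditasSwapStep szo betuk) t := by
  intro r
  induction r with
  | nil => intro sw t ht; simp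
  | cons i rest ih =>
    intro sw t ht
    simp only [List.foldl_cons]
    have hok : forditasOk (sw ++ t) i = forditasOk t i := by
      unfold forditasOk
      rw [getLastD_append_ne sw t ht]
      cases t with
      | nil => exact absurd rfl ht
      | cons x xs => cases sw <;> simp
    unfold forditasSwapStep
    rw [hok]
    by_cases hc : (forditasPair szo betuk i && forditasOk t i) = true
    · rw [if_pos hc, if_pos hc, List.append_assoc]
      exact ih sw (t ++ [i]) (by simp)
    · rw [if_neg hc, if_neg hc]
      exact ih sw t ht

-- restarting the stage-1 fold freshly after a closed swap list changes nothing
lemma swapFold_fresh (szo betuk : List Char) :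
    ∀ (k : Nat) (a b : Int) (sw : List Int), (b - a).toNat ≤ k → sw ≠ [] →
      sw.getLastD 0 ≤ a - 2 →
      (PySem.List.pyRange a b 1).foldl (forditasSwapStep szo betuk) sw
        = sw ++ (PySem.List.pyRange a b 1).foldl (forditasSwapStep szo betuk) [] := by
  intro k
  induction k with
  | zero =>
    intro a b sw hk _ _
    rw [PySem.List.pyRange_one_eq_nil (by omega)]
    simp
  | succ k ih =>
    intro a b sw hk hne hlast
    by_cases hab : a < b
    · rw [PySem.List.pyRange_one_cons hab]
      simp only [List.foldl_cons]
      have hoksw : forditasOk sw a = true := by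
        unfold forditasOk
        simp only [Bool.or_eq_true, decide_eq_true_eq]
        right; omega
      by_cases hp : forditasPair szo betuk a = true
      · have h1 : forditasSwapStep szo betuk sw a = sw ++ [a] := by
          unfold forditasSwapStep; rw [hp, hoksw]; rfl
        have h2 : forditasSwapStep szo betuk [] a = [a] := by
          unfold forditasSwapStep; rw [hp]; rfl
        rw [h1, h2, swapFold_shift szo betuk _ sw [a] (by simp)]
      · simp only [Bool.not_eq_true] at hp
        have h1 : forditasSwapStep szo betuk sw a = sw := by
          unfold forditasSwapStep; rw [hp]; rfl
        have h2 : forditasSwapStep szo betuk [] a = [] := by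
          unfold forditasSwapStep; rw [hp]; rfl
        rw [h1, h2]
        exact ih (a + 1) b sw (by omega) hne (by omega)
    · rw [PySem.List.pyRange_one_eq_nil (by omega)]
      simp

lemma swaps_stop (szo betuk : List Char) (j : Int) (h : (szo.length : Int) - 1 ≤ j) :
    forditasSwaps szo betuk j = [] := by
  unfold forditasSwaps
  rw [PySem.List.pyRange_one_eq_nil h]
  rfl

lemma swaps_cons_pair (szo betuk : List Char) (j : Nat)
    (hj : (j : Int) < (szo.length : Int) - 1) (hp : forditasPair szo betuk (j : Int) = true) :
    forditasSwaps szo betuk (j : Int) = (j : Int) :: forditasSwaps szo betuk ((j : Int) + 2) := by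
  unfold forditasSwaps
  rw [PySem.List.pyRange_one_cons hj]
  simp only [List.foldl_cons]
  have h1 : forditasSwapStep szo betuk [] (j : Int) = [(j : Int)] := by
    unfold forditasSwapStep; rw [hp]; rfl
  rw [h1]
  by_cases h2 : (j : Int) + 1 < (szo.length : Int) - 1
  · rw [PySem.List.pyRange_one_cons h2]
    simp only [List.foldl_cons]
    have h3 : forditasSwapStep szo betuk [(j : Int)] ((j : Int) + 1) = [(j : Int)] := by
      unfold forditasSwapStep forditasOk
      simp
    rw [h3, show (j : Int) + 1 + 1 = (j : Int) + 2 by ring, swapFold_fresh szo betuk (((szo.length : Int) - 1) - ((j : Int) + 2)).toNat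
          ((j : Int) + 2) ((szo.length : Int) - 1) [(j : Int)] le_rfl (by simp) (by simp),
        List.singleton_append]
  · rw [PySem.List.pyRange_one_eq_nil (by omega),
        PySem.List.pyRange_one_eq_nil (show (szo.length : Int) - 1 ≤ (j : Int) + 2 by omega)]
    rfl

lemma swaps_cons_nopair (szo betuk : List Char) (j : Int)
    (hj : j < (szo.length : Int) - 1) (hp : forditasPair szo betuk j = false) :
    forditasSwaps szo betuk j = forditasSwaps szo betuk (j + 1) := by
  unfold forditasSwaps
  rw [PySem.List.pyRange_one_cons hj]
  simp only [List.foldl_cons]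
  have h1 : forditasSwapStep szo betuk [] j = [] := by
    unfold forditasSwapStep; rw [hp]; rfl
  rw [h1]

lemma joinFold_acc (szo : List Char) :
    ∀ (l : List Int) (acc : List Char) (prev : Int),
      l.foldl (forditasJoinStep szo) (acc, prev)
        = (acc ++ (l.foldl (forditasJoinStep szo) ([], prev)).1,
           (l.foldl (forditasJoinStep szo) ([], prev)).2) := by
  intro l
  induction l with
  | nil => intro acc prev; simp
  | cons i rest ih =>
    intro acc prev
    simp only [List.foldl_cons, forditasJoinStep, List.nil_append]
    rw [ih _ (i + 2), ih (PySem.List.slice szo (some prev) (some i) ++ _) (i + 2)]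
    simp [List.append_assoc]

lemma slice_take_succ (szo : List Char) (prev j : Nat) (hpj : prev ≤ j) (hj : j < szo.length) :
    PySem.List.slice szo (some (prev : Int)) (some ((j : Int) + 1))
      = PySem.List.slice szo (some (prev : Int)) (some (j : Int)) ++ [PySem.List.pyGetD szo (j : Int) ' '] := by
  rw [show (j : Int) + 1 = ((j + 1 : Nat) : Int) by push_cast; ring,
      PySem.List.slice_natCast, PySem.List.slice_natCast,
      show j + 1 - prev = (j - prev) + 1 by omega, List.take_add_one]
  congr 1
  have hget : (szo.drop prev)[j - prev]? = some szo[j] := by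
    rw [List.getElem?_drop, show prev + (j - prev) = j by omega,
        List.getElem?_eq_getElem hj]
  rw [hget]
  simp only [Option.toList_some]
  rw [PySem.List.pyGetD_natCast, List.getD_eq_getElem _ _ hj]

lemma slice_past_end (szo : List Char) (prev j : Nat) (hj : szo.length ≤ j) :
    PySem.List.slice szo (some (prev : Int)) (some (j : Int)) = szo.drop prev := by
  rw [PySem.List.slice_natCast]
  exact List.take_of_length_le (by simp; omega)

lemma stitch_stop (szo betuk : List Char) (j prev : Nat) (_hpj : prev ≤ j) (hj : szo.length ≤ j) :
    forditasStitch szo (forditasSwaps szo betuk (j : Int)) (prev : Int)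
      = PySem.List.slice szo (some (prev : Int)) (some (j : Int)) ++ forditasGo szo betuk j := by
  rw [swaps_stop szo betuk _ (by omega)]
  unfold forditasStitch
  simp only [List.foldl_nil]
  rw [forditasGo, if_neg (by omega), PySem.List.slice_from_natCast,
      slice_past_end szo prev j hj]
  simp

-- the main correspondence: stitching the greedy swap list equals the greedy recursion
lemma stitch_eq_go (szo betuk : List Char) :
    ∀ (k j prev : Nat), szo.length - j ≤ k → prev ≤ j →
      forditasStitch szo (forditasSwaps szo betuk (j : Int)) (prev : Int)
        = PySem.List.slice szo (some (prev : Int)) (some (j : Int)) ++ forditasGo szo betuk j := by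
  intro k
  induction k with
  | zero =>
    intro j prev hk hpj
    exact stitch_stop szo betuk j prev hpj (by omega)
  | succ k ih =>
    intro j prev hk hpj
    by_cases hjn : j < szo.length
    · by_cases hc : (j : Int) ≠ (szo.length : Int) - 1 ∧ forditasPair szo betuk (j : Int) = true
      · have hjlt : (j : Int) < (szo.length : Int) - 1 := by
          have := hc.1; omega
        rw [swaps_cons_pair szo betuk j hjlt hc.2]
        unfold forditasStitch
        simp only [List.foldl_cons]
        have hstep : forditasJoinStep szo ([], (prev : Int)) (j : Int)
            = (PySem.List.slice szo (some (prev : Int)) (some (j : Int)) ++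
                 [PySem.List.pyGetD szo ((j : Int) + 1) ' ', PySem.List.pyGetD szo (j : Int) ' '],
               (j : Int) + 2) := by
          unfold forditasJoinStep; simp
        rw [hstep, joinFold_acc, show (j : Int) + 2 = ((j + 2 : Nat) : Int) by push_cast; ring]
        have ihs := ih (j + 2) (j + 2) (by omega) le_rfl
        unfold forditasStitch at ihs
        have hnil : PySem.List.slice szo (some ((j + 2 : Nat) : Int)) (some ((j + 2 : Nat) : Int)) = ([] : List Char) := by
          rw [PySem.List.slice_natCast]; simp
        rw [hnil, List.nil_append] at ihs
        push_cast at ihs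
        rw [forditasGo, if_pos hjn, if_pos hc]
        simp only [List.append_assoc]
        simp [ihs]
      · rw [forditasGo, if_pos hjn, if_neg hc]
        by_cases hje : (j : Int) = (szo.length : Int) - 1
        · rw [swaps_stop szo betuk _ (by omega)]
          unfold forditasStitch
          simp only [List.foldl_nil]
          rw [forditasGo, if_neg (by omega), PySem.List.slice_from_natCast]
          have hsucc := slice_take_succ szo prev j hpj hjn
          have h2 : PySem.List.slice szo (some (prev : Int)) (some ((j : Int) + 1)) = szo.drop prev := by
            rw [show (j : Int) + 1 = ((j + 1 : Nat) : Int) by push_cast; ring]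
            exact slice_past_end szo prev (j + 1) (by omega)
          rw [← h2, hsucc]
          simp
        · have hp : forditasPair szo betuk (j : Int) = false := by
            cases hpb : forditasPair szo betuk (j : Int) with
            | false => rfl
            | true => exact absurd ⟨hje, hpb⟩ hc
          have hjlt : (j : Int) < (szo.length : Int) - 1 := by omega
          rw [swaps_cons_nopair szo betuk (j : Int) hjlt hp,
              show (j : Int) + 1 = ((j + 1 : Nat) : Int) by push_cast; ring,
              ih (j + 1) prev (by omega) (by omega),
              show ((j + 1 : Nat) : Int) = (j : Int) + 1 by push_cast; ring,
              slice_take_succ szo prev j hpj hjn]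
          simp
    · exact stitch_stop szo betuk j prev hpj (by omega)

-- ===== VERDICT (by name: the statement is the Claim_ definition above) =====
theorem forditas_spec : Claim_equal_forditas := by
  intro beker _
  unfold Spec_forditas
  have hA : forditas beker = String.ofList (forditasGo beker.toList "szzsnytygyly".toList 0) := by
    unfold forditas
    simp only []
    rw [show (0 : Int) = ((0 : Nat) : Int) from rfl,
        fold_eq_go beker.toList "szzsnytygyly".toList 0 []]
    rfl
  have hB : forditas_alt beker
      = String.ofList (forditasStitch beker.toList
          (forditasSwaps beker.toList "szzsnytygyly".toList ((0 : Nat) : Int)) ((0 : Nat) : Int)) := rfl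
  rw [hA, hB, stitch_eq_go beker.toList "szzsnytygyly".toList beker.toList.length 0 0
        (by omega) le_rfl, PySem.List.slice_natCast]
  simp
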